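-- pv_equiv track=rewrite | github.com/rpizarrog/Curso-de-Python | retos/procesar_diccionarios.py | filtrar_carrera
-- ===== SOURCE A (Python) =====
-- def filtrar_carrera(diccionario, carr):
--     # - Extraer del diccionario solo los elementos cuyo segú la carrer 1-SISTEMAS 2-TIC 3-INFORMATICA
--     # esta extracción a una lista. Iterar Y DEVOLVER LA LISTA
--     lista_sis = []
--     lista_tic = []
--     lista_inf = []
--
--     for dicc in diccionario:
--         if diccionario[dicc]["carrera"] == 'SISTEMAS':
--             lista_sis.append(diccionario[dicc])
--         elif diccionario[dicc]["carrera"] == 'TIC':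
--             lista_tic.append(diccionario[dicc])
--         else:
--             lista_inf.append(diccionario[dicc])
--
--     if carr == 1:
--         return lista_sis
--     if carr == 2:
--         return lista_tic
--     if carr == 3:
--         return lista_inf
-- ===== SOURCE B (Python) =====
-- def filtrar_carrera(diccionario, carr):
--     # Branch on carr first, then one targeted comprehension over the values;
--     # the unused buckets are never built.
--     if carr == 1:
--         return [v for v in diccionario.values() if v["carrera"] == 'SISTEMAS']
--     if carr == 2:
--         return [v for v in diccionario.values() if v["carrera"] == 'TIC']
--     if carr == 3:
--         return [v for v in diccionario.values() if v["carrera"] not in ('SISTEMAS', 'TIC')]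
-- ===== Notes on version B (the rewrite author's own statement) =====
-- stated objective: simpler
-- what changed: B branches on carr first and builds only the one requested list with a single targeted comprehension over the dict values, instead of A's unconditional three-way partition into three bucket lists followed by a selection; for carr=3 it uses the negative filter carrera not in ('SISTEMAS','TIC') to match A's else-bucket.
-- outside the precondition, e.g. on filtrar_carrera({'a': {'carrera': 'TIC'}}, 5): A returns None, B returns None; on filtrar_carrera({'a': {}}, 1): A raises KeyError, B raises KeyError
import Mathlib
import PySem

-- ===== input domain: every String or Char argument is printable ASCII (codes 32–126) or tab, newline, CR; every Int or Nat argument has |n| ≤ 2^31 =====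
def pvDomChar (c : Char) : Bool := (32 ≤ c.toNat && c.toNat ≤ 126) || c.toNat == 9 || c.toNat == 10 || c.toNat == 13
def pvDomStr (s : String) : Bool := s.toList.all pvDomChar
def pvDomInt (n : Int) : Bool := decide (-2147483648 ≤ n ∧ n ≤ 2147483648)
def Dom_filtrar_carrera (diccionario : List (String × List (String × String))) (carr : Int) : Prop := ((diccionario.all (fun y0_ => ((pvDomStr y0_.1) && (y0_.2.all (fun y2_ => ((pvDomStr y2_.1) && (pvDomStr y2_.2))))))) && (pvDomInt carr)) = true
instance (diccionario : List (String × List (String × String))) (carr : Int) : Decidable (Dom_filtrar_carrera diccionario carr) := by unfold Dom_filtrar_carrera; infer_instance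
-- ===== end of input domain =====

-- B branches on carr first and builds only the requested list with one targeted filter over the
-- dict values, instead of A's unconditional three-way partition; same O(n) cost, simpler.


-- ===== PORT A =====
-- A iterates over the keys of the dict, looks each key up, and partitions the values into three
-- bucket lists; then selects a bucket by carr (falling through, i.e. no value, for other carr).
def filtrar_carrera (diccionario : List (String × List (String × String))) (carr : Int) : List (List (String × String)) :=
  let s := (PySem.Dict.mk diccionario).keys.foldl
    (fun (st : List (List (String × String)) × List (List (String × String)) × List (List (String × String))) dicc =>
      if (PySem.Dict.mk ((PySem.Dict.mk diccionario).getD dicc [])).getD "carrera" "" = "SISTEMAS" then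
        (st.1 ++ [(PySem.Dict.mk diccionario).getD dicc []], st.2.1, st.2.2)
      else if (PySem.Dict.mk ((PySem.Dict.mk diccionario).getD dicc [])).getD "carrera" "" = "TIC" then
        (st.1, st.2.1 ++ [(PySem.Dict.mk diccionario).getD dicc []], st.2.2)
      else (st.1, st.2.1, st.2.2 ++ [(PySem.Dict.mk diccionario).getD dicc []]))
    ([], [], [])
  if carr = 1 then s.1
  else if carr = 2 then s.2.1
  else if carr = 3 then s.2.2
  else []  -- Python A returns None here; excluded by Pre_

-- ===== PORT B =====
def filtrar_carrera_alt (diccionario : List (String × List (String × String))) (carr : Int) : List (List (String × String)) :=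
  let vals := diccionario.map (·.2)
  if carr = 1 then vals.filter (fun v => (PySem.Dict.mk v).getD "carrera" "" == "SISTEMAS")
  else if carr = 2 then vals.filter (fun v => (PySem.Dict.mk v).getD "carrera" "" == "TIC")
  else if carr = 3 then vals.filter (fun v =>
    !((PySem.Dict.mk v).getD "carrera" "" == "SISTEMAS" || (PySem.Dict.mk v).getD "carrera" "" == "TIC"))
  else []  -- Python B returns None here; excluded by Pre_

-- ===== PRECONDITION & SPEC =====
-- Pre_ requires: distinct outer keys (representational only — a Python dict cannot contain a
-- duplicate key, so no Python input is excluded); every value dict has a "carrera" key (otherwise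
-- A raises KeyError); and carr ∈ {1,2,3} (otherwise A falls through and returns None, not a list).
def Pre_filtrar_carrera (diccionario : List (String × List (String × String))) (carr : Int) : Prop :=
  (diccionario.map Prod.fst).Nodup ∧
  (∀ kv ∈ diccionario, "carrera" ∈ kv.2.map Prod.fst) ∧
  (carr = 1 ∨ carr = 2 ∨ carr = 3)
instance (diccionario : List (String × List (String × String))) (carr : Int) : Decidable (Pre_filtrar_carrera diccionario carr) := by unfold Pre_filtrar_carrera; infer_instance
def pvWitness_filtrar_carrera : (List (String × List (String × String))) × Int :=
  ([("ana", [("carrera", "SISTEMAS")]), ("bob", [("carrera", "TIC")]), ("eva", [("carrera", "INFORMATICA")])], 3)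
def Spec_filtrar_carrera (diccionario : List (String × List (String × String))) (carr : Int) (out : List (List (String × String))) : Prop := out = filtrar_carrera_alt diccionario carr
instance (diccionario : List (String × List (String × String))) (carr : Int) (out : List (List (String × String))) : Decidable (Spec_filtrar_carrera diccionario carr out) := by unfold Spec_filtrar_carrera; infer_instance

-- ===== CLAIM (what is proved, stated in full; the proofs are below) =====
def Claim_equal_filtrar_carrera : Prop := ∀ (diccionario : List (String × List (String × String))) (carr : Int), Dom_filtrar_carrera diccionario carr → Pre_filtrar_carrera diccionario carr → Spec_filtrar_carrera diccionario carr (filtrar_carrera diccionario carr)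

-- ===== LEMMAS AND PROOFS =====

-- abbreviation for A's loop step acting directly on an item pair (after lookup elimination)
def pvStep (st : List (List (String × String)) × List (List (String × String)) × List (List (String × String)))
    (v : List (String × String)) :
    List (List (String × String)) × List (List (String × String)) × List (List (String × String)) :=
  if (PySem.Dict.mk v).getD "carrera" "" = "SISTEMAS" then (st.1 ++ [v], st.2.1, st.2.2)
  else if (PySem.Dict.mk v).getD "carrera" "" = "TIC" then (st.1, st.2.1 ++ [v], st.2.2)
  else (st.1, st.2.1, st.2.2 ++ [v])

theorem pvFoldl_partition (l : List (List (String × String)))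
    (a b c : List (List (String × String))) :
    l.foldl pvStep (a, b, c) =
      (a ++ l.filter (fun v => (PySem.Dict.mk v).getD "carrera" "" == "SISTEMAS"),
       b ++ l.filter (fun v => (PySem.Dict.mk v).getD "carrera" "" == "TIC"),
       c ++ l.filter (fun v =>
         !((PySem.Dict.mk v).getD "carrera" "" == "SISTEMAS" || (PySem.Dict.mk v).getD "carrera" "" == "TIC"))) := by
  induction l generalizing a b c with
  | nil => simp
  | cons v t ih =>
    simp only [List.foldl_cons, List.filter_cons]
    by_cases h1 : (PySem.Dict.mk v).getD "carrera" "" = "SISTEMAS"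
    · simp [pvStep, h1, ih]
    · by_cases h2 : (PySem.Dict.mk v).getD "carrera" "" = "TIC"
      · simp [pvStep, h2, ih]
      · simp [pvStep, h1, h2, ih]

theorem pvFoldl_keys (diccionario : List (String × List (String × String)))
    (hnd : (diccionario.map Prod.fst).Nodup) :
    (PySem.Dict.mk diccionario).keys.foldl
      (fun (st : List (List (String × String)) × List (List (String × String)) × List (List (String × String))) dicc =>
        if (PySem.Dict.mk ((PySem.Dict.mk diccionario).getD dicc [])).getD "carrera" "" = "SISTEMAS" then
          (st.1 ++ [(PySem.Dict.mk diccionario).getD dicc []], st.2.1, st.2.2)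
        else if (PySem.Dict.mk ((PySem.Dict.mk diccionario).getD dicc [])).getD "carrera" "" = "TIC" then
          (st.1, st.2.1 ++ [(PySem.Dict.mk diccionario).getD dicc []], st.2.2)
        else (st.1, st.2.1, st.2.2 ++ [(PySem.Dict.mk diccionario).getD dicc []])) ([], [], []) =
    (diccionario.map Prod.snd).foldl pvStep ([], [], []) := by
  have hkeys : (PySem.Dict.mk diccionario).keys = diccionario.map Prod.fst := by
    simp [PySem.Dict.keys]
  rw [hkeys, List.foldl_map, List.foldl_map]
  refine PySem.List.foldl_congr_mem _ _ _ _ (fun st kv hmem => ?_)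
  have hget : (PySem.Dict.mk diccionario).getD kv.1 [] = kv.2 :=
    PySem.Dict.getD_of_mem_items (d := PySem.Dict.mk diccionario) (k := kv.1) (v := kv.2)
      (by simpa [PySem.Dict.items] using hmem) (by simpa [PySem.Dict.keys] using hnd) []
  rw [hget]
  rfl

-- ===== VERDICT (by name: the statement is the Claim_ definition above) =====
theorem filtrar_carrera_spec : Claim_equal_filtrar_carrera := by
  intro diccionario carr _hdom hpre
  obtain ⟨hnd, _hcar, hcarr⟩ := hpre
  show filtrar_carrera diccionario carr = filtrar_carrera_alt diccionario carr
  unfold filtrar_carrera filtrar_carrera_alt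
  rw [pvFoldl_keys diccionario hnd, pvFoldl_partition]
  rcases hcarr with h | h | h <;> simp [h]
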